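-- pv_equiv track=rewrite | github.com/spartan289/PycharmProjects | learn/andoruni.py | solve
-- ===== SOURCE A (Python) =====
-- def solve(arr, n):
--     if n == 1:
--         return arr[0]
--
--     ans = 0
--     powerof2=1
--     for i in range(0, 32):
--         k1 = 0
--         for j in range(n):
--             if arr[j] & (1 << i):
--                 k1 += 1
--         if k1>1:
--             ans += powerof2
--         powerof2*=2
--     return ans
-- ===== SOURCE B (Python) =====
-- def solve(arr, n):
--     if n == 1:
--         return arr[0]
--     mask = (1 << 32) - 1
--     ones = twos = 0
--     for x in arr[:max(n, 0)]:
--         x &= mask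
--         twos |= ones & x
--         ones |= x
--     return twos
-- ===== Notes on version B (the rewrite author's own statement) =====
-- stated objective: faster
-- what changed: Replaces the 32-per-bit outer loop each rescanning all n elements with a single linear pass that keeps two bitwise accumulators (bits seen once / bits seen at least twice).
import Mathlib
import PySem

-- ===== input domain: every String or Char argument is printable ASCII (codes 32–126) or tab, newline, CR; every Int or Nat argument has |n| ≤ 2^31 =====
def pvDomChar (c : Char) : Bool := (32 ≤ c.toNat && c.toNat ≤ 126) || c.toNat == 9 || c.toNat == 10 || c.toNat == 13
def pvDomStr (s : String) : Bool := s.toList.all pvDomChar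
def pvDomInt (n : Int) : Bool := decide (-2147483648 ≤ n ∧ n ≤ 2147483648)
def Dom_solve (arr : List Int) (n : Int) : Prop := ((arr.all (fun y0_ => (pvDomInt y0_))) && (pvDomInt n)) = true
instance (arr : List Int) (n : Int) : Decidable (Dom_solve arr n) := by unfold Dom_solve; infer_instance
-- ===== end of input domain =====

-- B replaces A's 32×n per-bit counting double loop by a single linear pass keeping two
-- bitwise accumulators (bits seen once / bits seen at least twice); same return value.

-- ===== PORT A =====
-- literal port of A: per-bit outer loop over i in range(32), inner count over j in range(n)
def solve (arr : List Int) (n : Int) : Int :=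
  if n = 1 then (PySem.List.pyGet? arr 0).getD 0
  else
    ((PySem.List.pyRange 0 32 1).foldl (fun (st : Int × Int) i =>
        let k1 : Int := (PySem.List.pyRange 0 n 1).foldl
          (fun k1 j => if Int.land (PySem.List.pyGetD arr j 0) ((1:Int) <<< i) ≠ 0 then k1 + 1 else k1) 0
        (if k1 > 1 then st.1 + st.2 else st.1, st.2 * 2)) ((0 : Int), (1 : Int))).1

-- ===== PORT B =====
-- literal port of B: one pass, state (ones, twos); each element masked to its low 32 bits
def solve_alt (arr : List Int) (n : Int) : Int :=
  if n = 1 then (PySem.List.pyGet? arr 0).getD 0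
  else
    let mask : Int := 1 <<< 32 - 1
    ((PySem.List.slice arr none (some (max n 0))).foldl
        (fun (ot : Int × Int) x =>
          let y := Int.land x mask
          (Int.lor ot.1 y, Int.lor ot.2 (Int.land ot.1 y))) ((0 : Int), (0 : Int))).2

-- ===== PRECONDITION & SPEC =====
-- Pre_ excludes exactly the inputs where A raises IndexError: n = 1 with arr empty (arr[0]),
-- or 1 < n with the loop reading arr[j] past the end; i.e. it requires n ≤ len(arr).
def Pre_solve (arr : List Int) (n : Int) : Prop := n ≤ (arr.length : Int)
instance (arr : List Int) (n : Int) : Decidable (Pre_solve arr n) := by unfold Pre_solve; infer_instance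
def pvWitness_solve : List Int × Int := ([1, 3, -3], 3)
def Spec_solve (arr : List Int) (n : Int) (out : Int) : Prop := out = solve_alt arr n
instance (arr : List Int) (n : Int) (out : Int) : Decidable (Spec_solve arr n out) := by unfold Spec_solve; infer_instance

-- ===== CLAIM (what is proved, stated in full; the proofs are below) =====
def Claim_equal_solve : Prop := ∀ (arr : List Int) (n : Int), Dom_solve arr n → Pre_solve arr n → Spec_solve arr n (solve arr n)

-- ===== LEMMAS AND PROOFS =====

def pvMask : Int := 1 <<< 32 - 1

theorem pvMask_eq : pvMask = ((2 ^ 32 - 1 : Nat) : Int) := by decide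

theorem land_natCast_nonneg (x : Int) (m : Nat) : 0 ≤ Int.land x (m : Int) := by
  cases x <;> simp [Int.land]

theorem land_nonneg' (a b : Int) (ha : 0 ≤ a) (hb : 0 ≤ b) : 0 ≤ Int.land a b := by
  obtain ⟨y, rfl⟩ := Int.eq_ofNat_of_zero_le hb
  exact land_natCast_nonneg a y

theorem lor_nonneg' (a b : Int) (ha : 0 ≤ a) (hb : 0 ≤ b) : 0 ≤ Int.lor a b := by
  obtain ⟨x, rfl⟩ := Int.eq_ofNat_of_zero_le ha
  obtain ⟨y, rfl⟩ := Int.eq_ofNat_of_zero_le hb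
  simp [Int.lor]

theorem int_ext_testBit (x y : Int) (hx : 0 ≤ x) (hy : 0 ≤ y)
    (h : ∀ k, x.testBit k = y.testBit k) : x = y := by
  obtain ⟨a, rfl⟩ := Int.eq_ofNat_of_zero_le hx
  obtain ⟨b, rfl⟩ := Int.eq_ofNat_of_zero_le hy
  exact congrArg _ (Nat.eq_of_testBit_eq h)

theorem testBit_land_mask (x : Int) (k : Nat) :
    (Int.land x pvMask).testBit k = (x.testBit k && decide (k < 32)) := by
  rw [pvMask_eq, Int.testBit_land]
  rw [show (((2 ^ 32 - 1 : Nat) : Int)).testBit k = ((2 ^ 32 - 1 : Nat)).testBit k from rfl]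
  rw [Nat.testBit_two_pow_sub_one]

theorem A_cond (x : Int) (k : Nat) :
    decide (Int.land x ((1 : Int) <<< (k : Int)) ≠ 0) = x.testBit k := by
  have hzt : ∀ j, (0 : Int).testBit j = false := fun j => by
    simp [Int.testBit, Nat.zero_testBit]
  rw [Int.one_shiftLeft]
  have htb : ∀ j, (Int.land x ((2 ^ k : Nat) : Int)).testBit j
      = (x.testBit j && decide (k = j)) := by
    intro j
    rw [Int.testBit_land,
      show (((2 ^ k : Nat) : Int)).testBit j = ((2 ^ k : Nat)).testBit j from rfl,
      Nat.testBit_two_pow]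
  cases hxb : x.testBit k with
  | true =>
    have hne : Int.land x ((2 ^ k : Nat) : Int) ≠ 0 := by
      intro h0
      have := htb k
      rw [h0, hzt k] at this
      simp [hxb] at this
    exact decide_eq_true hne
  | false =>
    have h0 : Int.land x ((2 ^ k : Nat) : Int) = 0 := by
      apply int_ext_testBit _ _ (land_natCast_nonneg x _) le_rfl
      intro j
      rw [htb j, hzt j]
      by_cases hjk : k = j
      · subst hjk; simp [hxb]
      · simp [hjk]
    exact decide_eq_false (fun hne => hne h0)

-- A's inner loop counts, over the first m elements, those with the tested bit set
theorem innerA (arr : List Int) (i : Int) : ∀ (m : Nat), m ≤ arr.length →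
    (PySem.List.pyRange 0 (m : Int) 1).foldl
      (fun k1 j => if Int.land (PySem.List.pyGetD arr j 0) ((1:Int) <<< i) ≠ 0 then k1 + 1 else k1) (0 : Int)
    = (((arr.take m).countP (fun x => decide (Int.land x ((1:Int) <<< i) ≠ 0)) : Nat) : Int) := by
  intro m
  induction m with
  | zero => intro _; simp [PySem.List.pyRange_one_eq_nil le_rfl]
  | succ m ih =>
    intro hm
    have hm' : m < arr.length := by omega
    rw [show ((m + 1 : Nat) : Int) = (m : Int) + 1 by push_cast; ring,
      PySem.List.pyRange_one_succ_right (by positivity), List.foldl_append,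
      ih (by omega), List.take_add_one]
    rw [show arr[m]? = some arr[m] from List.getElem?_eq_getElem hm']
    rw [List.countP_append]
    simp only [List.foldl_cons, List.foldl_nil, List.countP_cons, List.countP_nil,
      PySem.List.pyGetD_natCast, List.getD_eq_getElem arr 0 hm', Option.toList_some]
    by_cases h : Int.land arr[m] ((1 : Int) <<< i) ≠ 0
    · rw [if_pos h, if_pos (decide_eq_true h)]; push_cast; ring
    · rw [if_neg h, if_neg (by simpa using h)]; push_cast; ring

-- A's outer loop accumulates ans = Σ 2^i over qualifying bits, powerof2 = 2^w
theorem outerA (f : Int → Int) : ∀ (w : Nat) (a p : Int),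
    (PySem.List.pyRange 0 (w : Int) 1).foldl
      (fun (st : Int × Int) i => (if f i > 1 then st.1 + st.2 else st.1, st.2 * 2)) (a, p)
    = (a + p * ((List.range w).map (fun (i : Nat) => if f (↑i) > 1 then (2 : Int) ^ i else 0)).sum,
       p * (2 : Int) ^ w) := by
  intro w
  induction w with
  | zero => intro a p; simp [PySem.List.pyRange_one_eq_nil le_rfl]
  | succ w ih =>
    intro a p
    rw [show ((w + 1 : Nat) : Int) = (w : Int) + 1 by push_cast; ring,
      PySem.List.pyRange_one_succ_right (by positivity), List.foldl_append, ih,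
      List.range_succ, List.map_append, List.sum_append]
    simp only [List.foldl_cons, List.foldl_nil, List.map_cons, List.map_nil, List.sum_cons,
      List.sum_nil]
    rw [Prod.mk.injEq]
    refine ⟨?_, by ring⟩
    split_ifs with h <;> ring

-- the Nat-valued bit sum: bound and bit characterisation
theorem sumT (g : Nat → Bool) : ∀ (w : Nat),
    ((List.range w).map (fun i => if g i then (2 : Nat) ^ i else 0)).sum < 2 ^ w ∧
    ∀ k, (((List.range w).map (fun i => if g i then (2 : Nat) ^ i else 0)).sum).testBit k
      = (decide (k < w) && g k) := by
  intro w
  induction w with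
  | zero => simp
  | succ w ih =>
    obtain ⟨ihb, iht⟩ := ih
    rw [List.range_succ, List.map_append, List.sum_append]
    simp only [List.map_cons, List.map_nil, List.sum_cons, List.sum_nil, Nat.add_zero]
    have hpow : (2 : Nat) ^ (w + 1) = 2 ^ w + 2 ^ w := by ring
    by_cases hg : g w
    · rw [if_pos hg]
      refine ⟨by omega, ?_⟩
      intro k
      rw [Nat.add_comm _ (2 ^ w)]
      rcases lt_trichotomy k w with hk | hk | hk
      · rw [Nat.testBit_two_pow_add_gt hk, iht k,
          decide_eq_true hk, decide_eq_true (show k < w + 1 by omega)]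
      · subst hk
        rw [Nat.testBit_two_pow_add_eq, iht k]
        simp [hg]
      · rw [Nat.testBit_lt_two_pow (by
          calc 2 ^ w + _ < 2 ^ w + 2 ^ w := by omega
          _ = 2 ^ (w + 1) := hpow.symm
          _ ≤ 2 ^ k := Nat.pow_le_pow_right (by norm_num) (by omega))]
        simp [show ¬ k < w + 1 by omega]
    · rw [if_neg hg]
      refine ⟨by omega, ?_⟩
      intro k
      rw [Nat.add_zero, iht k]
      by_cases hk : k = w
      · subst hk; simp [hg]
      · by_cases hk2 : k < w
        · simp [hk2, show k < w + 1 by omega]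
        · simp [show ¬ k < w by omega, show ¬ k < w + 1 by omega]

theorem castSum (g : Nat → Bool) : ∀ (w : Nat),
    ((List.range w).map (fun i => if g i then (2 : Int) ^ i else 0)).sum
    = ((((List.range w).map (fun i => if g i then (2 : Nat) ^ i else 0)).sum : Nat) : Int) := by
  intro w
  induction w with
  | zero => simp
  | succ w ih =>
    rw [List.range_succ, List.map_append, List.sum_append, ih, List.map_append,
      List.sum_append]
    simp only [List.map_cons, List.map_nil, List.sum_cons, List.sum_nil]
    push_cast
    split_ifs <;> push_cast <;> ring

theorem auxOr1 (o b : Bool) (c : Nat) :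
    ((o || b) || decide (1 ≤ c)) = (o || decide (1 ≤ c + if b = true then 1 else 0)) := by
  cases b <;> cases o <;> by_cases hc : 1 ≤ c <;> simp [hc] <;> omega

theorem auxOr2 (o t b : Bool) (c : Nat) :
    ((t || (o && b)) || decide (2 ≤ c) || ((o || b) && decide (1 ≤ c)))
      = (t || decide (2 ≤ c + if b = true then 1 else 0)
          || (o && decide (1 ≤ c + if b = true then 1 else 0))) := by
  cases b <;> cases o <;> cases t <;> by_cases h1 : 1 ≤ c <;> by_cases h2 : 2 ≤ c <;>
    simp [h1, h2] <;> omega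

-- B's fold: ones collects bits seen ≥ 1 time, twos bits seen ≥ 2 times
theorem foldB (k : Nat) : ∀ (L : List Int) (o t : Int), 0 ≤ o → 0 ≤ t →
    0 ≤ (L.foldl (fun (ot : Int × Int) x =>
          (Int.lor ot.1 (Int.land x pvMask), Int.lor ot.2 (Int.land ot.1 (Int.land x pvMask)))) (o, t)).1 ∧
    0 ≤ (L.foldl (fun (ot : Int × Int) x =>
          (Int.lor ot.1 (Int.land x pvMask), Int.lor ot.2 (Int.land ot.1 (Int.land x pvMask)))) (o, t)).2 ∧
    (L.foldl (fun (ot : Int × Int) x =>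
          (Int.lor ot.1 (Int.land x pvMask), Int.lor ot.2 (Int.land ot.1 (Int.land x pvMask)))) (o, t)).1.testBit k
      = (o.testBit k || decide (1 ≤ L.countP (fun x => (Int.land x pvMask).testBit k))) ∧
    (L.foldl (fun (ot : Int × Int) x =>
          (Int.lor ot.1 (Int.land x pvMask), Int.lor ot.2 (Int.land ot.1 (Int.land x pvMask)))) (o, t)).2.testBit k
      = (t.testBit k || decide (2 ≤ L.countP (fun x => (Int.land x pvMask).testBit k))
          || (o.testBit k && decide (1 ≤ L.countP (fun x => (Int.land x pvMask).testBit k)))) := by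
  intro L
  induction L with
  | nil => intro o t ho ht; simp [ho, ht]
  | cons x L ihL =>
    intro o t ho ht
    have hy : 0 ≤ Int.land x pvMask := by
      rw [pvMask_eq]; exact land_natCast_nonneg x _
    have ho' : 0 ≤ Int.lor o (Int.land x pvMask) := lor_nonneg' _ _ ho hy
    have ht' : 0 ≤ Int.lor t (Int.land o (Int.land x pvMask)) :=
      lor_nonneg' _ _ ht (land_nonneg' _ _ ho hy)
    obtain ⟨h1, h2, h3, h4⟩ := ihL (Int.lor o (Int.land x pvMask))
      (Int.lor t (Int.land o (Int.land x pvMask))) ho' ht'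
    simp only [List.foldl_cons] at *
    refine ⟨h1, h2, ?_, ?_⟩
    · rw [h3, Int.testBit_lor, List.countP_cons]
      exact auxOr1 _ _ _
    · rw [h4, Int.testBit_lor, Int.testBit_lor, Int.testBit_land, List.countP_cons]
      exact auxOr2 _ _ _ _

-- ===== VERDICT (by name: the statement is the Claim_ definition above) =====
theorem testBit_natCast' (a k : Nat) : ((a : Int)).testBit k = a.testBit k := rfl

theorem zero_testBit_int (j : Nat) : (0 : Int).testBit j = false := by
  simp [Int.testBit, Nat.zero_testBit]

theorem solve_spec : Claim_equal_solve := by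
  intro arr n _ hpre
  unfold Spec_solve solve solve_alt
  by_cases hn1 : n = 1
  · simp [hn1]
  · simp only [if_neg hn1]
    have hlen : n.toNat ≤ arr.length := by
      unfold Pre_solve at hpre; omega
    have hrange : PySem.List.pyRange 0 n 1 = PySem.List.pyRange 0 ((n.toNat : Nat) : Int) 1 := by
      by_cases hn : 0 ≤ n
      · rw [Int.toNat_of_nonneg hn]
      · rw [PySem.List.pyRange_one_eq_nil (by omega),
          PySem.List.pyRange_one_eq_nil (by omega)]
    have hslice : PySem.List.slice arr none (some (max n 0)) = arr.take n.toNat := by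
      rw [show max n 0 = ((n.toNat : Nat) : Int) by omega, PySem.List.slice_to_natCast]
    rw [hrange, hslice, show (32 : Int) = ((32 : Nat) : Int) by norm_num]
    rw [outerA (fun i => (PySem.List.pyRange 0 ((n.toNat : Nat) : Int) 1).foldl
      (fun k1 j => if Int.land (PySem.List.pyGetD arr j 0) ((1 : Int) <<< i) ≠ 0
        then k1 + 1 else k1) (0 : Int)) 32 0 1]
    rw [show (((1 <<< 32 : Nat) : Int) - 1) = pvMask from rfl]
    simp only [zero_add, one_mul]
    -- the per-bit membership count over the first n elements
    have hcnt : ∀ i : Nat,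
        (PySem.List.pyRange 0 ((n.toNat : Nat) : Int) 1).foldl
          (fun k1 j => if Int.land (PySem.List.pyGetD arr j 0) ((1 : Int) <<< (i : Int)) ≠ 0
            then k1 + 1 else k1) (0 : Int)
        = (((arr.take n.toNat).countP (fun x => x.testBit i) : Nat) : Int) := by
      intro i
      rw [innerA arr ((i : Nat) : Int) n.toNat hlen]
      congr 1
      exact List.countP_congr (fun x _ => by rw [A_cond x i])
    have hmap : ((List.range 32).map (fun (i : Nat) =>
        if (PySem.List.pyRange 0 ((n.toNat : Nat) : Int) 1).foldl
          (fun k1 j => if Int.land (PySem.List.pyGetD arr j 0) ((1 : Int) <<< (i : Int)) ≠ 0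
            then k1 + 1 else k1) (0 : Int) > 1 then (2 : Int) ^ i else 0))
        = ((List.range 32).map (fun (i : Nat) =>
            if (fun i => decide (2 ≤ (arr.take n.toNat).countP (fun x => x.testBit i))) i
              then (2 : Int) ^ i else 0)) := by
      apply List.map_congr_left
      intro i _
      rw [hcnt i]
      by_cases h2 : 2 ≤ (arr.take n.toNat).countP (fun x => x.testBit i)
      · rw [if_pos (by exact_mod_cast h2), if_pos (by simpa using h2)]
      · rw [if_neg (by exact_mod_cast h2), if_neg (by simpa using h2)]
    rw [hmap, castSum]
    -- B's fold, bit by bit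
    obtain ⟨-, hb2⟩ := sumT (fun i => decide (2 ≤ (arr.take n.toNat).countP (fun x => x.testBit i))) 32
    apply int_ext_testBit _ _ (Int.natCast_nonneg _)
      ((foldB 0 (arr.take n.toNat) 0 0 le_rfl le_rfl).2.1)
    intro k
    obtain ⟨_, _, _, htb⟩ := foldB k (arr.take n.toNat) 0 0 le_rfl le_rfl
    rw [htb, testBit_natCast',
      hb2 k, zero_testBit_int k]
    simp only [Bool.false_or, Bool.false_and, Bool.or_false]
    by_cases hk : k < 32
    · have hc : (arr.take n.toNat).countP (fun x => (Int.land x pvMask).testBit k)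
          = (arr.take n.toNat).countP (fun x => x.testBit k) := by
        apply List.countP_congr
        intro x _
        rw [testBit_land_mask, decide_eq_true hk, Bool.and_true]
      rw [hc, decide_eq_true hk, Bool.true_and]
    · have hc : (arr.take n.toNat).countP (fun x => (Int.land x pvMask).testBit k) = 0 := by
        apply List.countP_eq_zero.mpr
        intro x _
        rw [testBit_land_mask, decide_eq_false hk, Bool.and_false]
        simp
      rw [hc, decide_eq_false hk, Bool.false_and]
      simp
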